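-- pv_equiv track=rewrite | github.com/lwmcdona/AdventOfCode2023 | day14/part2.py | rollEast
-- ===== SOURCE A (Python) =====
-- def rollEast(lines, max_load):
--     load = 0
--     num_rows = len(lines)
--     num_cols = len(lines[0])
--     for j in range(num_cols - 1, -1, -1):
--         for i in range(num_rows):
--             if lines[i][j] == 'O':
--                 col = j
--                 while col < num_cols - 1 and lines[i][col + 1] == '.':
--                     lines[i][j] = '.'
--                     col += 1
--
--                 lines[i][col] = 'O'
--
--                 # calculate the load for rock
--                 load += max_load - i
--     return load
-- ===== SOURCE B (Python) =====
-- def rollEast(lines, max_load):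
--     # Rolling east never moves a rock out of its row, so the load is just
--     # (max_load - i) per 'O' in row i (restricted to the first len(lines[0])
--     # columns, the only ones A inspects).  No grid simulation, no mutation.
--     ncols = len(lines[0])
--     return sum((max_load - i) * row[:ncols].count('O') for i, row in enumerate(lines))
-- ===== Notes on version B (the rewrite author's own statement) =====
-- stated objective: faster
-- what changed: B observes that an east tilt keeps every rock in its row, so the returned load is simply sum over rows of (max_load - i) times the number of 'O' cells in the first len(lines[0]) columns; the whole grid simulation (and its mutation of lines) is dropped in favour of one counting pass.
import Mathlib
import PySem

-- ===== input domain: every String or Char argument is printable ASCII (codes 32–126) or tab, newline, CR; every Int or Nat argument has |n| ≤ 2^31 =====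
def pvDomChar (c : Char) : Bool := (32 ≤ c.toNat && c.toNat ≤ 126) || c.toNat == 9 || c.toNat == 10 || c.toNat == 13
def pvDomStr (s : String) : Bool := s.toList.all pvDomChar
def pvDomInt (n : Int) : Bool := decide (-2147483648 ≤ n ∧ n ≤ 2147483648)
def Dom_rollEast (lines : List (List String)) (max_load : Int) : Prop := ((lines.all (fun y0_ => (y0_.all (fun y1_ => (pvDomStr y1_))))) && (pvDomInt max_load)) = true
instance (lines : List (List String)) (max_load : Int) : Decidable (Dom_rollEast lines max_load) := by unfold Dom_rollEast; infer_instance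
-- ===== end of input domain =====

-- B replaces A's east-tilt grid simulation by one counting pass: rolling east keeps every rock
-- in its row, so the load is sum over rows of (max_load - i) * (#'O' in the first num_cols cells).
-- A mutates `lines` in place; B does not — the equivalence proved here is about the RETURN value only.

-- ===== PORT A =====
-- lines[i][j] (read) and lines[i][j] = v (write), with pyGetD/pySetD; in range under Pre_
def pvCell (g : List (List String)) (i j : Int) : String :=
  PySem.List.pyGetD (PySem.List.pyGetD g i []) j ""

def pvSetCell (g : List (List String)) (i j : Int) (v : String) : List (List String) :=
  PySem.List.pySetD g i (PySem.List.pySetD (PySem.List.pyGetD g i []) j v)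

-- while col < num_cols - 1 and lines[i][col+1] == '.': lines[i][j] = '.'; col += 1
def pvWhile (ncols i j : Int) (g : List (List String)) (col : Int) :
    List (List String) × Int :=
  if h : col < ncols - 1 ∧ pvCell g i (col + 1) = "." then
    pvWhile ncols i j (pvSetCell g i j ".") (col + 1)
  else (g, col)
termination_by (ncols - 1 - col).toNat
decreasing_by omega

-- the body of `for i in range(num_rows)`
def pvStep (ncols mx j : Int) (st : List (List String) × Int) (i : Int) :
    List (List String) × Int :=
  if pvCell st.1 i j = "O" then
    let r := pvWhile ncols i j st.1 j
    (pvSetCell r.1 i r.2 "O", st.2 + (mx - i))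
  else st

def rollEast (lines : List (List String)) (max_load : Int) : Int :=
  let num_rows : Int := (lines.length : Int)
  let num_cols : Int := ((PySem.List.pyGetD lines 0 []).length : Int)
  ((PySem.List.pyRange (num_cols - 1) (-1) (-1)).foldl
    (fun st j => (PySem.List.pyRange 0 num_rows 1).foldl
      (fun st i => pvStep num_cols max_load j st i) st)
    (lines, (0 : Int))).2

-- ===== PORT B =====
def rollEast_alt (lines : List (List String)) (max_load : Int) : Int :=
  let ncols : Int := ((PySem.List.pyGetD lines 0 []).length : Int)
  (PySem.List.enumerate lines 0).foldl
    (fun acc p =>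
      acc + (max_load - p.1) *
        ((PySem.List.count (PySem.List.slice p.2 none (some ncols)) "O" : Nat) : Int))
    0

-- ===== PRECONDITION & SPEC =====
-- Pre_ excludes exactly the inputs where A raises IndexError: empty `lines` (lines[0]) and
-- grids with a row shorter than the first row (lines[i][j] is read for every j < len(lines[0])).
def Pre_rollEast (lines : List (List String)) (max_load : Int) : Prop :=
  lines ≠ [] ∧ ∀ row ∈ lines, (lines.getD 0 []).length ≤ row.length
instance (lines : List (List String)) (max_load : Int) : Decidable (Pre_rollEast lines max_load) := by
  unfold Pre_rollEast; infer_instance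

def pvWitness_rollEast : List (List String) × Int := ([["O", ".", "O"], [".", "O", "."]], 10)

def Spec_rollEast (lines : List (List String)) (max_load : Int) (out : Int) : Prop := out = rollEast_alt lines max_load
instance (lines : List (List String)) (max_load : Int) (out : Int) : Decidable (Spec_rollEast lines max_load out) := by unfold Spec_rollEast; infer_instance

-- ===== CLAIM (what is proved, stated in full; the proofs are below) =====
def Claim_equal_rollEast : Prop := ∀ (lines : List (List String)) (max_load : Int), Dom_rollEast lines max_load → Pre_rollEast lines max_load → Spec_rollEast lines max_load (rollEast lines max_load)

-- ===== LEMMAS AND PROOFS =====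

-- Nat-level cell read
def cN (g : List (List String)) (i c : Nat) : String := (g.getD i []).getD c ""

theorem pvCell_natCast (g : List (List String)) (i c : Nat) :
    pvCell g (i : Int) (c : Int) = cN g i c := by
  simp [pvCell, cN]

theorem pvSetCell_natCast (g : List (List String)) (i c : Nat) (v : String) :
    pvSetCell g (i : Int) (c : Int) v = g.set i ((g.getD i []).set c v) := by
  simp [pvSetCell]

theorem cN_set_ne (g : List (List String)) (i c i' c' : Nat) (v : String)
    (h : i' ≠ i ∨ c' ≠ c) :
    cN (g.set i ((g.getD i []).set c v)) i' c' = cN g i' c' := by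
  unfold cN
  by_cases hii : i' = i
  · subst hii
    have hc : c' ≠ c := by tauto
    by_cases hi : i' < g.length
    · have h1 : (g.set i' ((g.getD i' []).set c v)).getD i' [] = (g.getD i' []).set c v := by
        rw [List.getD_eq_getElem?_getD, List.getElem?_set_self hi]; rfl
      rw [h1, List.getD_eq_getElem?_getD, List.getElem?_set_ne (Ne.symm hc),
        ← List.getD_eq_getElem?_getD]
    · rw [List.set_eq_of_length_le (by omega)]
  · have h1 : (g.set i ((g.getD i []).set c v)).getD i' [] = g.getD i' [] := by
      rw [List.getD_eq_getElem?_getD, List.getElem?_set_ne (fun e => hii e.symm),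
        ← List.getD_eq_getElem?_getD]
    rw [h1]

theorem setCell_idem (g : List (List String)) (i c : Nat) (v : String) :
    pvSetCell (pvSetCell g (i : Int) (c : Int) v) (i : Int) (c : Int) v
      = pvSetCell g (i : Int) (c : Int) v := by
  rw [pvSetCell_natCast, pvSetCell_natCast]
  by_cases hi : i < g.length
  · have h1 : (g.set i ((g.getD i []).set c v)).getD i [] = (g.getD i []).set c v := by
      rw [List.getD_eq_getElem?_getD, List.getElem?_set_self hi]; rfl
    rw [h1, List.set_set, List.set_set]
  · rw [List.set_eq_of_length_le (by simpa using hi),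
      List.set_eq_of_length_le (by simpa using hi)]

theorem pvWhile_col_le (ncols i j : Int) (g : List (List String)) (col : Int) :
    col ≤ (pvWhile ncols i j g col).2 := by
  fun_induction pvWhile ncols i j g col with
  | case1 g col h ih => omega
  | case2 g col h => simp

theorem pvWhile_grid (ncols : Int) (i j : Nat) (g : List (List String)) (col : Int) :
    (pvWhile ncols (i : Int) (j : Int) g col).1 = g ∨
    (pvWhile ncols (i : Int) (j : Int) g col).1 = pvSetCell g (i : Int) (j : Int) "." := by
  fun_induction pvWhile ncols (i : Int) (j : Int) g col with
  | case1 g col h ih =>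
    rcases ih with h1 | h1
    · right; exact h1
    · right; rw [h1, setCell_idem]
  | case2 g col h => left; rfl

theorem pvStep_load (ncols mx : Int) (j : Int) (st : List (List String) × Int) (i : Int) :
    (pvStep ncols mx j st i).2 = st.2 + (if pvCell st.1 i j = "O" then mx - i else 0) := by
  unfold pvStep
  split <;> simp_all

theorem pvStep_cell (ncols mx : Int) (i j : Nat) (st : List (List String) × Int)
    (i' c : Nat) (h : i' ≠ i ∨ c < j) :
    cN (pvStep ncols mx (j : Int) st (i : Int)).1 i' c = cN st.1 i' c := by
  unfold pvStep
  split
  · dsimp only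
    have hcol := pvWhile_col_le ncols (i : Int) (j : Int) st.1 (j : Int)
    obtain ⟨cn, hcn⟩ : ∃ cn : Nat, (pvWhile ncols (i : Int) (j : Int) st.1 (j : Int)).2 = (cn : Int) :=
      ⟨_, (Int.toNat_of_nonneg (le_trans (by positivity) hcol)).symm⟩
    have hjc : j ≤ cn := by omega
    rw [hcn, pvSetCell_natCast,
      cN_set_ne _ _ _ _ _ _ (h.imp (fun hx => hx) (fun hx => by omega))]
    rcases pvWhile_grid ncols i j st.1 (j : Int) with hg | hg
    · rw [hg]
    · rw [hg, pvSetCell_natCast,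
        cN_set_ne _ _ _ _ _ _ (h.imp (fun hx => hx) (fun hx => by omega))]
  · rfl

theorem inner_fold (ncols mx : Int) (j : Nat) (is : List Nat) :
    is.Pairwise (· < ·) → ∀ (st : List (List String) × Int),
    (is.foldl (fun s (i : Nat) => pvStep ncols mx (j : Int) s (i : Int)) st).2
      = st.2 + (is.map (fun i => if cN st.1 i j = "O" then mx - (i : Int) else 0)).sum
    ∧ ∀ i' c : Nat, (c < j ∨ (c = j ∧ i' ∉ is)) →
        cN (is.foldl (fun s (i : Nat) => pvStep ncols mx (j : Int) s (i : Int)) st).1 i' c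
          = cN st.1 i' c := by
  induction is with
  | nil => intro _ st; exact ⟨by simp, fun i' c _ => rfl⟩
  | cons i is ih =>
    intro hs st
    obtain ⟨IH1, IH2⟩ := ih hs.of_cons (pvStep ncols mx (j : Int) st (i : Int))
    constructor
    · rw [List.foldl_cons, IH1, pvStep_load,
        List.map_congr_left (fun i' hi' =>
          if_congr (by rw [pvStep_cell ncols mx i j st i' j
            (Or.inl (by have := List.rel_of_pairwise_cons hs hi'; omega))]) rfl rfl),
        pvCell_natCast, List.map_cons, List.sum_cons, add_assoc]
    · intro i' c hc
      rw [List.foldl_cons,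
        IH2 i' c (hc.imp (fun hx => hx)
          (fun hx => ⟨hx.1, fun hm => hx.2 (List.mem_cons_of_mem _ hm)⟩)),
        pvStep_cell ncols mx i j st i' c
          (hc.elim Or.inr (fun hx => Or.inl (fun e => hx.2 (e ▸ List.mem_cons_self))))]

theorem outer_fold (ncols mx : Int) (n : Nat) (js : List Nat) :
    js.Pairwise (· > ·) → ∀ (st : List (List String) × Int),
    (js.foldl (fun s (j : Nat) =>
        (List.range n).foldl (fun s (i : Nat) => pvStep ncols mx (j : Int) s (i : Int)) s) st).2
      = st.2 + (js.map (fun j =>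
          ((List.range n).map (fun i => if cN st.1 i j = "O" then mx - (i : Int) else 0)).sum)).sum := by
  induction js with
  | nil => intro _ st; simp
  | cons j js ih =>
    intro hs st
    obtain ⟨H1, H2⟩ := inner_fold ncols mx j (List.range n) List.pairwise_lt_range st
    have hmap : List.map (fun j' => (List.map (fun i =>
          if cN ((List.range n).foldl
              (fun s (i : Nat) => pvStep ncols mx (j : Int) s (i : Int)) st).1 i j' = "O"
          then mx - (i : Int) else 0) (List.range n)).sum) js
        = List.map (fun j' => (List.map (fun i =>
          if cN st.1 i j' = "O" then mx - (i : Int) else 0) (List.range n)).sum) js := by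
      apply List.map_congr_left
      intro j' hj'
      congr 1
      apply List.map_congr_left
      intro i _
      rw [H2 i j' (Or.inl (List.rel_of_pairwise_cons hs hj'))]
    rw [List.foldl_cons, ih hs.of_cons, H1, hmap, List.map_cons, List.sum_cons, add_assoc]

theorem sum_swap (js is : List Nat) (f : Nat → Nat → Int) :
    (js.map (fun j => (is.map (fun i => f i j)).sum)).sum
      = (is.map (fun i => (js.map (fun j => f i j)).sum)).sum := by
  induction js with
  | nil => simp
  | cons j js ih =>
    rw [List.map_cons, List.sum_cons, ih, ← PySem.List.sum_map_add_int]
    simp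

theorem row_count (m : Nat) (l : List String) (x : Int) (hm : m ≤ l.length) :
    ((List.range m).map (fun j => if l.getD j "" = "O" then x else 0)).sum
      = x * (((l.take m).count "O" : Nat) : Int) := by
  induction m generalizing l with
  | zero => simp
  | succ m ih =>
    cases l with
    | nil => simp at hm
    | cons a t =>
      rw [List.range_succ_eq_map, List.map_cons, List.map_map, List.sum_cons]
      have hmap : (List.map ((fun j => if (a :: t).getD j "" = "O" then x else 0) ∘ Nat.succ)
            (List.range m)) = List.map (fun j => if t.getD j "" = "O" then x else 0)
            (List.range m) := by
        apply List.map_congr_left; intro k _; simp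
      rw [hmap, ih t (by simpa using hm), List.take_succ_cons, List.count_cons]
      simp only [List.getD_cons_zero]
      push_cast
      by_cases ha : a = "O" <;> simp [ha] <;> ring

theorem rollEast_alt_eq (lines : List (List String)) (mx : Int) :
    rollEast_alt lines mx
      = ((List.range lines.length).map (fun i =>
          (mx - Int.ofNat i) *
            ((((lines.getD i []).take (lines.getD 0 []).length).count "O" : Nat) : Int))).sum := by
  simp only [rollEast_alt]
  rw [PySem.List.enumerate_eq_map_pyRange lines [], PySem.List.len_eq,
    PySem.List.pyRange_zero_natCast, List.map_map, List.foldl_map, PySem.List.foldl_add, zero_add]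
  congr 1
  apply List.map_congr_left
  intro k _
  simp [PySem.List.pyGetD_zero, PySem.List.count_eq, PySem.List.slice_to_natCast]

theorem rollEast_eq (lines : List (List String)) (mx : Int) :
    rollEast lines mx
      = ((List.range (lines.getD 0 []).length).reverse.map (fun j =>
          ((List.range lines.length).map (fun i =>
            if cN lines i j = "O" then mx - (i : Int) else 0)).sum)).sum := by
  simp only [rollEast]
  have h1 : PySem.List.pyRange (((lines.getD 0 []).length : Int) - 1) (-1) (-1)
      = ((List.range (lines.getD 0 []).length).reverse).map (fun (k : Nat) => (k : Int)) := by
    rw [PySem.List.pyRange_neg_one_eq_reverse]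
    have he : ((lines.getD 0 []).length : Int) - 1 + 1 = ((lines.getD 0 []).length : Int) := by ring
    rw [neg_add_cancel, he, PySem.List.pyRange_zero_natCast, List.map_reverse]
  rw [PySem.List.pyGetD_zero, h1, PySem.List.pyRange_zero_natCast]
  rw [List.foldl_map]
  simp only [List.foldl_map]
  have hrev : ((List.range (lines.getD 0 []).length).reverse).Pairwise (· > ·) :=
    List.pairwise_reverse.mpr (by simpa using List.pairwise_lt_range)
  rw [outer_fold _ _ _ _ hrev (lines, 0)]
  simp

-- ===== VERDICT (by name: the statement is the Claim_ definition above) =====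
theorem rollEast_spec : Claim_equal_rollEast := by
  intro lines mx _hdom hpre
  unfold Spec_rollEast
  rw [rollEast_eq, rollEast_alt_eq, List.map_reverse, List.sum_reverse,
    sum_swap (List.range (lines.getD 0 []).length) (List.range lines.length)
      (fun i j => if cN lines i j = "O" then mx - (i : Int) else 0)]
  congr 1
  apply List.map_congr_left
  intro i hi
  have him : lines.getD i [] ∈ lines := by
    rw [List.getD_eq_getElem lines [] (by simpa using hi)]
    exact List.getElem_mem _
  have hrow := hpre.2 _ him
  simpa [cN] using row_count (lines.getD 0 []).length (lines.getD i []) (mx - (i : Int)) hrow
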